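-- pv_equiv track=rewrite | github.com/Neclow/phylaudio | plots/fig3_geo.py | _coef_suffix_to_display
-- ===== SOURCE A (Python) =====
-- _VAR_DISPLAY = {
--     "longitude": "Longitude",
--     "latitude": "Latitude",
--     "log_n_speakers": "log_n_speakers",
--     "n_phonemes": "n_phonemes",
--     "delta": "delta",
-- }
--
-- def _coef_suffix_to_display(suffix):
--     known = _VAR_DISPLAY
--     if suffix in known:
--         return known[suffix]
--     for v1 in sorted(known, key=len, reverse=True):
--         if suffix.startswith(v1 + "_"):
--             rest = suffix[len(v1) + 1 :]
--             if rest in known: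
--                 return f"{known[v1]}×{known[rest]}"
--     return None
-- ===== SOURCE B (Python) =====
-- _VAR_DISPLAY = {
--     "longitude": "Longitude",
--     "latitude": "Latitude",
--     "log_n_speakers": "log_n_speakers",
--     "n_phonemes": "n_phonemes",
--     "delta": "delta",
-- }
--
-- _TABLE = dict(_VAR_DISPLAY)
-- for _v1, _d1 in _VAR_DISPLAY.items():
--     for _v2, _d2 in _VAR_DISPLAY.items():
--         _TABLE[f"{_v1}_{_v2}"] = f"{_d1}\u00d7{_d2}"
--
--
-- def _coef_suffix_to_display(suffix):
--     return _TABLE.get(suffix)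
-- ===== Notes on version B (the rewrite author's own statement) =====
-- stated objective: simpler
-- what changed: Replaces the per-call membership check plus sorted-longest-prefix scan with a single lookup in a flat 30-entry table (5 base names plus all 25 compound keys) precomputed once at module load; the function body becomes one line.
import Mathlib
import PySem

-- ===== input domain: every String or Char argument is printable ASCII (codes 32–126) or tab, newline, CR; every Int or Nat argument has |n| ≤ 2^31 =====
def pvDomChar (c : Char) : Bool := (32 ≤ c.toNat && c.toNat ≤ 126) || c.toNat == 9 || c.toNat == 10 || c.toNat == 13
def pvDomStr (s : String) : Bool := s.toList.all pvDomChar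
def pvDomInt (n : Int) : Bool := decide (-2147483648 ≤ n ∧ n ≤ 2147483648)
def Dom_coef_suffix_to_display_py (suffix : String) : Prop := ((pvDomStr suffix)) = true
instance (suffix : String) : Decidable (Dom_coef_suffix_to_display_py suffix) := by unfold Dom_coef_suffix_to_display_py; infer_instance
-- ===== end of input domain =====

-- B replaces A's per-call sorted longest-prefix scan by one lookup in a flat table
-- (5 base + 25 compound keys) precomputed once, for a one-line body; proved equal on every input.

-- ===== PORT A =====
def pvVarDisplay : PySem.Dict String String :=
  PySem.Dict.ofList [("longitude", "Longitude"), ("latitude", "Latitude"),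
    ("log_n_speakers", "log_n_speakers"), ("n_phonemes", "n_phonemes"), ("delta", "delta")]

-- body of A's 'for v1 in sorted(...)' loop, with early return carried in the accumulator
def pvLoopBody (suffix : String) (acc : Option String) (v1 : String) : Option String :=
  match acc with
  | some r => some r
  | none =>
    if PySem.Str.startswith suffix (v1 ++ "_") then
      let rest := PySem.Str.slice suffix (some (PySem.Str.len v1 + 1)) none
      if pvVarDisplay.contains rest then
        some ((pvVarDisplay.getD v1 "") ++ "×" ++ (pvVarDisplay.getD rest ""))
      else none
    else none

def coef_suffix_to_display_py (suffix : String) : Option String :=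
  if pvVarDisplay.contains suffix then pvVarDisplay.get? suffix
  else
    (PySem.List.sorted pvVarDisplay.keys (fun k => PySem.Str.len k) true).foldl
      (pvLoopBody suffix) none

-- ===== PORT B =====
def pvBaseItems : List (String × String) :=
  [("longitude", "Longitude"), ("latitude", "Latitude"),
   ("log_n_speakers", "log_n_speakers"), ("n_phonemes", "n_phonemes"), ("delta", "delta")]

-- one-time table build: base entries, then every compound entry v1_v2 ↦ d1×d2
def pvTable : PySem.Dict String String :=
  pvBaseItems.foldl
    (fun d p =>
      pvBaseItems.foldl (fun d q => d.insert (p.1 ++ "_" ++ q.1) (p.2 ++ "×" ++ q.2)) d)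
    (PySem.Dict.ofList pvBaseItems)

def coef_suffix_to_display_py_alt (suffix : String) : Option String :=
  pvTable.get? suffix

-- ===== PRECONDITION & SPEC =====
def Spec_coef_suffix_to_display_py (suffix : String) (out : Option String) : Prop := out = coef_suffix_to_display_py_alt suffix
instance (suffix : String) (out : Option String) : Decidable (Spec_coef_suffix_to_display_py suffix out) := by unfold Spec_coef_suffix_to_display_py; infer_instance

-- ===== CLAIM (what is proved, stated in full; the proofs are below) =====
def Claim_equal_coef_suffix_to_display_py : Prop := ∀ (suffix : String), Dom_coef_suffix_to_display_py suffix → Spec_coef_suffix_to_display_py suffix (coef_suffix_to_display_py suffix)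

-- ===== LEMMAS AND PROOFS =====

-- the 30 keys of B's table, in table insertion order (5 base, then the 25 compounds)
def pvAllKeys : List String := ["longitude", "latitude", "log_n_speakers", "n_phonemes", "delta", "longitude_longitude", "longitude_latitude", "longitude_log_n_speakers", "longitude_n_phonemes", "longitude_delta", "latitude_longitude", "latitude_latitude", "latitude_log_n_speakers", "latitude_n_phonemes", "latitude_delta", "log_n_speakers_longitude", "log_n_speakers_latitude", "log_n_speakers_log_n_speakers", "log_n_speakers_n_phonemes", "log_n_speakers_delta", "n_phonemes_longitude", "n_phonemes_latitude", "n_phonemes_log_n_speakers", "n_phonemes_n_phonemes", "n_phonemes_delta", "delta_longitude", "delta_latitude", "delta_log_n_speakers", "delta_n_phonemes", "delta_delta"]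

theorem pv_sorted_lit :
    PySem.List.sorted pvVarDisplay.keys (fun k => PySem.Str.len k) true
      = ["log_n_speakers", "n_phonemes", "longitude", "latitude", "delta"] := by decide

theorem pv_table_keys : pvTable.keys = pvAllKeys := by decide

theorem pv_known_keys : pvVarDisplay.keys = ["longitude", "latitude", "log_n_speakers", "n_phonemes", "delta"] := by decide

theorem pv_alt_none (s : String) (h : s ∉ pvAllKeys) :
    coef_suffix_to_display_py_alt s = none := by
  unfold coef_suffix_to_display_py_alt
  rw [PySem.Dict.get?_eq_none_iff_not_mem_keys, pv_table_keys]
  exact h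

theorem pv_body_none (s p : String)
    (h : ∀ k ∈ pvVarDisplay.keys, s ≠ (p ++ "_") ++ k) :
    pvLoopBody s none p = none := by
  unfold pvLoopBody
  by_cases hs : PySem.Str.startswith s (p ++ "_") = true
  · rw [if_pos hs]
    simp only [PySem.Str.startswith_eq] at hs
    rw [PySem.Chars.startswith_iff] at hs
    obtain ⟨t, ht⟩ := hs
    have hrest : (PySem.Str.slice s (some (PySem.Str.len p + 1)) none).toList = t := by
      have h1 : PySem.Str.len p + 1 = ((p.length + 1 : Nat) : Int) := by
        simp [PySem.Str.len_eq]
      rw [h1]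
      rw [PySem.Str.toList_slice, PySem.Chars.slice_eq_listSlice,
        PySem.List.slice_from_natCast, ← ht]
      have h2 : (p ++ "_").toList.length = p.length + 1 := by simp
      rw [← h2, List.drop_left]
    by_cases hc : pvVarDisplay.contains (PySem.Str.slice s (some (PySem.Str.len p + 1)) none) = true
    · exfalso
      rw [PySem.Dict.contains_iff_mem_keys] at hc
      have hk := hc
      have hse : s = (p ++ "_") ++ (PySem.Str.slice s (some (PySem.Str.len p + 1)) none) := by
        apply String.ext
        show s.toList = _
        rw [String.toList_append, hrest, ht]
      exact h _ hk hse
    · rw [if_neg hc]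
  · rw [if_neg hs]

theorem pv_main (s : String) :
    coef_suffix_to_display_py s = coef_suffix_to_display_py_alt s := by
  by_cases hmem : s ∈ pvAllKeys
  · fin_cases hmem <;> decide
  · have hb : ∀ p ∈ pvVarDisplay.keys, ∀ k ∈ pvVarDisplay.keys, s ≠ (p ++ "_") ++ k := by
      intro p hp k hk he
      exact hmem (by rw [pv_known_keys] at hp hk; subst he; fin_cases hp <;> fin_cases hk <;> decide)
    have hcont : pvVarDisplay.contains s = false := by
      rw [PySem.Dict.contains_eq_decide_mem_keys, pv_known_keys, decide_eq_false_iff_not]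
      intro hm
      exact hmem (by fin_cases hm <;> decide)
    rw [pv_alt_none s hmem]
    unfold coef_suffix_to_display_py
    rw [hcont, pv_sorted_lit]
    simp only [Bool.false_eq_true, if_false]
    rw [List.foldl_cons, pv_body_none s _ (hb _ (by rw [pv_known_keys]; decide)),
        List.foldl_cons, pv_body_none s _ (hb _ (by rw [pv_known_keys]; decide)),
        List.foldl_cons, pv_body_none s _ (hb _ (by rw [pv_known_keys]; decide)),
        List.foldl_cons, pv_body_none s _ (hb _ (by rw [pv_known_keys]; decide)),
        List.foldl_cons, pv_body_none s _ (hb _ (by rw [pv_known_keys]; decide)),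
        List.foldl_nil]

-- ===== VERDICT (by name: the statement is the Claim_ definition above) =====
theorem coef_suffix_to_display_py_spec : Claim_equal_coef_suffix_to_display_py := by
  intro s _
  unfold Spec_coef_suffix_to_display_py
  exact pv_main s
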